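-- pv_equiv track=rewrite | github.com/ghdtldus/ai-animal-face | backend/app/utils/inference.py | filter_forbidden_pairs
-- ===== SOURCE A (Python) =====
-- forbidden_pairs = {
--     ('cat', 'bear'),
--     ('cat', 'dinosaur'),
--     ('snake', 'bear'),
--     ('rabbit', 'bear'),
--     ('turtle', 'cat')
-- }
--
-- def filter_forbidden_pairs(top_k_list):
--     """
--     top_k_list: 동물 이름 리스트 (유사도 높은 순)
--     이미 선택된 동물들과 forbidden_pairs에 포함되는 동물은 건너뜀
--     최대 2개까지만 선택
--     """
--     result = []
--     for animal in top_k_list: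
--         # 이미 선택된 동물들과 금지 조합인지 체크
--         if all((animal, other) not in forbidden_pairs and (other, animal) not in forbidden_pairs
--                for other in result):
--             result.append(animal)
--         if len(result) >= 2:  # 최대 2개까지만 선택
--             break
--     return result
-- ===== SOURCE B (Python) =====
-- forbidden_pairs = {
--     ('cat', 'bear'),
--     ('cat', 'dinosaur'),
--     ('snake', 'bear'),
--     ('rabbit', 'bear'),
--     ('turtle', 'cat')
-- }
--
-- def filter_forbidden_pairs(top_k_list):
--     # Build a symmetric incompatibility index once, so the per-candidate
--     # double tuple-membership test disappears; then filter the tail by a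
--     # single set lookup and slice, instead of an accumulate-and-break loop.
--     # (Result is independent of the set's iteration order: only membership
--     # of the value-sets is ever used.)
--     bad = {}
--     for a, b in forbidden_pairs:
--         bad.setdefault(a, set()).add(b)
--         bad.setdefault(b, set()).add(a)
--     if not top_k_list:
--         return []
--     seed = top_k_list[0]
--     blocked = bad.get(seed, set())
--     partners = [x for x in top_k_list[1:] if x not in blocked]
--     return [seed] + partners[:1]
-- ===== Notes on version B (the rewrite author's own statement) =====
-- stated objective: alternative
-- what changed: Replaces the accumulate-and-break loop with a precomputed symmetric incompatibility index (animal -> set of blocked partners) plus a filter-then-slice: the tail is filtered by one set lookup and the result is head + first filtered element, with no early exit and no pairwise double membership test.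
import Mathlib
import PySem

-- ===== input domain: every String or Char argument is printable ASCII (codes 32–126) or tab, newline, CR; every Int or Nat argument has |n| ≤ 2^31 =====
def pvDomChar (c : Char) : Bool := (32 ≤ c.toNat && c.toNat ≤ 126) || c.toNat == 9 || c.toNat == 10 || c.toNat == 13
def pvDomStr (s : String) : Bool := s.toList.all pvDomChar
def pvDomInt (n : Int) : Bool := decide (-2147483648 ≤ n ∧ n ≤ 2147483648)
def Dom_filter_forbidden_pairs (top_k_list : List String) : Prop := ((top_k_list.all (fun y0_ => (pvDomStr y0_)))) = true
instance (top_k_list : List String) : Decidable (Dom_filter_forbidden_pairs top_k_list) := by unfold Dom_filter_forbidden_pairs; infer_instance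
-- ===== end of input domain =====

-- B: precomputed symmetric incompatibility index + filter-then-slice, instead of A's accumulate-and-break loop (return value only).

-- ===== PORT A =====
def forbiddenPairs : List (String × String) :=
  [("cat", "bear"), ("cat", "dinosaur"), ("snake", "bear"), ("rabbit", "bear"), ("turtle", "cat")]

-- the generator-all check of A, for one candidate against the current result list
def okWith (animal : String) (result : List String) : Bool :=
  result.all (fun other =>
    !(forbiddenPairs.contains (animal, other)) && !(forbiddenPairs.contains (other, animal)))

-- A's loop: result accumulator, append when compatible, break at length ≥ 2
def loopA : List String → List String → List String
  | result, [] => result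
  | result, animal :: rest =>
    let result' := if okWith animal result then result ++ [animal] else result
    if result'.length ≥ 2 then result' else loopA result' rest

def filter_forbidden_pairs (top_k_list : List String) : List String :=
  loopA [] top_k_list

-- ===== PORT B =====
-- Source B iterates the forbidden_pairs set to build `bad`; the result is iteration-order
-- independent (only membership of the value-sets is used), so a fixed order is exact.
def forbiddenPairsB : List (String × String) :=
  [("cat", "bear"), ("cat", "dinosaur"), ("snake", "bear"), ("rabbit", "bear"), ("turtle", "cat")]

-- bad = {}; for a, b in forbidden_pairs: bad.setdefault(a,set()).add(b); bad.setdefault(b,set()).add(a)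
def badMap : PySem.Dict String (PySem.Set String) :=
  forbiddenPairsB.foldl (fun d p =>
    let d1 := PySem.Dict.insert d p.1 (PySem.Set.add (PySem.Dict.getD d p.1 PySem.Set.empty) p.2)
    PySem.Dict.insert d1 p.2 (PySem.Set.add (PySem.Dict.getD d1 p.2 PySem.Set.empty) p.1))
    PySem.Dict.empty

def filter_forbidden_pairs_alt (top_k_list : List String) : List String :=
  let bad := badMap
  match top_k_list with
  | [] => []
  | seed :: rest =>
    let blocked := PySem.Dict.getD bad seed PySem.Set.empty
    let partners := rest.filter (fun x => !(PySem.Set.contains blocked x))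
    [seed] ++ partners.take 1

-- ===== PRECONDITION & SPEC =====
def Spec_filter_forbidden_pairs (top_k_list : List String) (out : List String) : Prop := out = filter_forbidden_pairs_alt top_k_list
instance (top_k_list : List String) (out : List String) : Decidable (Spec_filter_forbidden_pairs top_k_list out) := by unfold Spec_filter_forbidden_pairs; infer_instance

-- ===== CLAIM (what is proved, stated in full; the proofs are below) =====
def Claim_equal_filter_forbidden_pairs : Prop := ∀ (top_k_list : List String), Dom_filter_forbidden_pairs top_k_list → Spec_filter_forbidden_pairs top_k_list (filter_forbidden_pairs top_k_list)

-- ===== LEMMAS AND PROOFS =====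

-- A's pairwise test against a single selected animal
def compatA (seed x : String) : Bool :=
  !(forbiddenPairs.contains (seed, x)) && !(forbiddenPairs.contains (x, seed))

lemma okWith_singleton (a s : String) : okWith a [s] = compatA s a := by
  simp [okWith, compatA, List.all, Bool.and_comm]

lemma badMap_eq : badMap = PySem.Dict.mk
    [("cat", ["bear", "dinosaur", "turtle"]), ("bear", ["cat", "snake", "rabbit"]),
     ("dinosaur", ["cat"]), ("snake", ["bear"]), ("rabbit", ["bear"]), ("turtle", ["cat"])] := by
  decide

-- B's blocked-set lookup agrees (negated) with A's symmetric pairwise test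
lemma blocked_eq (s x : String) :
    PySem.Set.contains (PySem.Dict.getD badMap s PySem.Set.empty) x = !(compatA s x) := by
  rw [badMap_eq]
  simp only [PySem.Dict.getD, PySem.Dict.get?_mk_cons, beq_iff_eq]
  by_cases h1 : "cat" = s
  · subst h1
    simp [PySem.Set.contains, compatA, forbiddenPairs, Prod.ext_iff, Bool.or_assoc]
  rw [if_neg h1]
  by_cases h2 : "bear" = s
  · subst h2
    simp [PySem.Set.contains, compatA, forbiddenPairs, Prod.ext_iff, Bool.or_assoc]
  rw [if_neg h2]
  by_cases h3 : "dinosaur" = s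
  · subst h3
    simp [PySem.Set.contains, compatA, forbiddenPairs, Prod.ext_iff, Bool.or_assoc]
  rw [if_neg h3]
  by_cases h4 : "snake" = s
  · subst h4
    simp [PySem.Set.contains, compatA, forbiddenPairs, Prod.ext_iff, Bool.or_assoc]
  rw [if_neg h4]
  by_cases h5 : "rabbit" = s
  · subst h5
    simp [PySem.Set.contains, compatA, forbiddenPairs, Prod.ext_iff, Bool.or_assoc]
  rw [if_neg h5]
  by_cases h6 : "turtle" = s
  · subst h6
    simp [PySem.Set.contains, compatA, forbiddenPairs, Prod.ext_iff, Bool.or_assoc]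
  rw [if_neg h6]
  simp [PySem.Set.contains, compatA, forbiddenPairs, Prod.ext_iff, PySem.Dict.get?,
    Ne.symm h1, Ne.symm h2, Ne.symm h3, Ne.symm h4, Ne.symm h5, Ne.symm h6]

-- A's loop after the seed is selected = filter-then-take-1
lemma loopA_seed (seed : String) (rest : List String) :
    loopA [seed] rest = seed :: (rest.filter (fun x => compatA seed x)).take 1 := by
  induction rest with
  | nil => simp [loopA]
  | cons x rest ih =>
    by_cases h : compatA seed x
    · simp [loopA, okWith_singleton, h, List.filter]
    · simp only [loopA, okWith_singleton, h, if_false, List.filter_cons]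
      simpa [h] using ih

-- ===== VERDICT (by name: the statement is the Claim_ definition above) =====
theorem filter_forbidden_pairs_spec : Claim_equal_filter_forbidden_pairs := by
  intro l _
  unfold Spec_filter_forbidden_pairs filter_forbidden_pairs filter_forbidden_pairs_alt
  cases l with
  | nil => rfl
  | cons seed rest =>
    have h0 : okWith seed [] = true := rfl
    simp only [loopA, h0, if_true, List.nil_append, List.length_singleton]
    norm_num
    rw [loopA_seed]
    have h : ∀ x, (decide (x ∈ PySem.Dict.getD badMap seed []) : Bool) = !(compatA seed x) := by
      intro x
      rw [← blocked_eq seed x]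
      simp [PySem.Set.contains, PySem.Set.empty]
    simp only [h, Bool.not_not]
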